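-- pv_equiv track=rewrite | github.com/deeppavlov/DeepPavlov | deeppavlov/datasets/dialog_dataset.py | _dialog_indices
-- ===== SOURCE A (Python) =====
-- def _dialog_indices(data):
--     dialog_indices = []
--     i, last_idx = 0, 0
--     dialog = {}
--     for turn in data:
--         if turn[2].get('episode_done'):
--             if dialog:
--                 dialog['end'] = i
--                 last_idx = i
--                 dialog_indices.append(dialog)
--             dialog = {'start': last_idx}
--         i += 1
--     dialog['end'] = i
--     dialog_indices.append(dialog)
--     return dialog_indices
-- ===== SOURCE B (Python) =====
-- def _dialog_indices(data):
--     n = len(data)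
--     boundaries = [i for i, turn in enumerate(data) if turn[2].get('episode_done')]
--     if not boundaries:
--         return [{'end': n}]
--     starts = [0] + boundaries[1:]
--     ends = boundaries[1:] + [n]
--     return [{'start': s, 'end': e} for s, e in zip(starts, ends)]
-- ===== Notes on version B (the rewrite author's own statement) =====
-- stated objective: alternative
-- what changed: B first collects the boundary indices (turns flagged episode_done) in one comprehension, then zips starts [0]+bs[1:] with ends bs[1:]+[n] to build the ranges, instead of A's single loop maintaining a running dialog dict, last_idx and truthiness checks.
import Mathlib
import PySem

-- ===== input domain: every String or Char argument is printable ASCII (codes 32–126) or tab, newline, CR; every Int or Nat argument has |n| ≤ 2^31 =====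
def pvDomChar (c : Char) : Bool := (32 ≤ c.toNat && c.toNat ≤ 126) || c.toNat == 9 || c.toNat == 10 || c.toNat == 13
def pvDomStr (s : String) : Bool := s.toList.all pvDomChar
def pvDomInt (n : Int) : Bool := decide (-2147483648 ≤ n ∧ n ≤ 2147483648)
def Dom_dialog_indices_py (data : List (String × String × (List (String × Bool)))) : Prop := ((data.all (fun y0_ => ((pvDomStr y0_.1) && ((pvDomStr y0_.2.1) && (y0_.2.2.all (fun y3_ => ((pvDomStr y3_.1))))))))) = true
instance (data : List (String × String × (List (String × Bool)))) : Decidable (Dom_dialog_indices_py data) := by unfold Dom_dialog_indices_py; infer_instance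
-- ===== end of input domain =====

-- B builds the boundary-index list first and zips starts with ends, instead of A's
-- running-dict loop; objective: alternative decomposition (same cost).

-- turn[2].get('episode_done') is truthy  (values are bools, so truthy = True)
def pvEpisodeDone (t : String × String × (List (String × Bool))) : Bool :=
  (PySem.Dict.get? (PySem.Dict.mk t.2.2) "episode_done") == some true

-- ===== PORT A =====
-- the for-loop of A, with state (i, last_idx, dialog, dialog_indices); after the loop
-- the final `dialog['end'] = i; dialog_indices.append(dialog)` is performed
def dialogGoA (rest : List (String × String × (List (String × Bool))))
    (i last_idx : Int) (dialog : List (String × Int))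
    (acc : List (List (String × Int))) : List (List (String × Int)) :=
  match rest with
  | [] => acc ++ [(PySem.Dict.insert (PySem.Dict.mk dialog) "end" i).items]
  | t :: rs =>
    if pvEpisodeDone t then
      if dialog.isEmpty then
        dialogGoA rs (i + 1) last_idx [("start", last_idx)] acc
      else
        dialogGoA rs (i + 1) i [("start", i)]
          (acc ++ [(PySem.Dict.insert (PySem.Dict.mk dialog) "end" i).items])
    else
      dialogGoA rs (i + 1) last_idx dialog acc

def dialog_indices_py (data : List (String × String × (List (String × Bool)))) : List (List (String × Int)) :=
  dialogGoA data 0 0 [] []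

-- ===== PORT B =====
def dialog_indices_py_alt (data : List (String × String × (List (String × Bool)))) : List (List (String × Int)) :=
  let n : Int := data.length
  let boundaries : List Int :=
    ((PySem.List.enumerate data).filter (fun p => pvEpisodeDone p.2)).map (·.1)
  if boundaries.isEmpty then
    [[("end", n)]]
  else
    let starts := 0 :: boundaries.tail
    let ends := boundaries.tail ++ [n]
    (starts.zip ends).map (fun p => [("start", p.1), ("end", p.2)])

-- ===== PRECONDITION & SPEC =====
def Spec_dialog_indices_py (data : List (String × String × (List (String × Bool)))) (out : List (List (String × Int))) : Prop := out = dialog_indices_py_alt data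
instance (data : List (String × String × (List (String × Bool)))) (out : List (List (String × Int))) : Decidable (Spec_dialog_indices_py data out) := by unfold Spec_dialog_indices_py; infer_instance

-- ===== CLAIM (what is proved, stated in full; the proofs are below) =====
def Claim_equal_dialog_indices_py : Prop := ∀ (data : List (String × String × (List (String × Bool)))), Dom_dialog_indices_py data → Spec_dialog_indices_py data (dialog_indices_py data)

-- ===== LEMMAS AND PROOFS =====

theorem pvItemsStart (s i : Int) :
    (PySem.Dict.insert (PySem.Dict.mk [("start", s)]) "end" i).items
      = [("start", s), ("end", i)] := by rfl

theorem pvItemsNil (i : Int) :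
    (PySem.Dict.insert (PySem.Dict.mk ([] : List (String × Int))) "end" i).items
      = [("end", i)] := by rfl

-- boundary indices of the remaining turns, counting from i
def pvBnds (rest : List (String × String × (List (String × Bool)))) (i : Int) : List Int :=
  match rest with
  | [] => []
  | t :: rs => if pvEpisodeDone t then i :: pvBnds rs (i + 1) else pvBnds rs (i + 1)

-- the ranges produced from a first start s, inner boundaries bs and final end n
def pvRanges (s : Int) (bs : List Int) (n : Int) : List (List (String × Int)) :=
  match bs with
  | [] => [[("start", s), ("end", n)]]
  | b :: bs' => [("start", s), ("end", b)] :: pvRanges b bs' n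

theorem dialogGoA_start (rest : List (String × String × (List (String × Bool))))
    (i last_idx s : Int) (acc : List (List (String × Int))) (n : Int)
    (hn : n = i + rest.length) :
    dialogGoA rest i last_idx [("start", s)] acc
      = acc ++ pvRanges s (pvBnds rest i) n := by
  induction rest generalizing i last_idx s acc n with
  | nil =>
    subst hn
    simp [dialogGoA, pvBnds, pvRanges, pvItemsStart]
  | cons t rs ih =>
    have hn' : n = (i + 1) + (rs.length : Int) := by
      rw [hn]; push_cast [List.length_cons]; ring
    by_cases h : pvEpisodeDone t = true
    · rw [show dialogGoA (t :: rs) i last_idx [("start", s)] acc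
          = dialogGoA rs (i + 1) i [("start", i)] (acc ++ [[("start", s), ("end", i)]]) by
        simp [dialogGoA, h, pvItemsStart]]
      rw [ih (i + 1) i i (acc ++ [[("start", s), ("end", i)]]) n hn']
      simp [pvBnds, h, pvRanges]
    · rw [show dialogGoA (t :: rs) i last_idx [("start", s)] acc
          = dialogGoA rs (i + 1) last_idx [("start", s)] acc by simp [dialogGoA, h]]
      rw [ih (i + 1) last_idx s acc n hn']
      simp [pvBnds, h]

theorem dialogGoA_empty (rest : List (String × String × (List (String × Bool))))
    (i last_idx : Int) (acc : List (List (String × Int))) (n : Int)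
    (hn : n = i + rest.length) :
    dialogGoA rest i last_idx [] acc
      = match pvBnds rest i with
        | [] => acc ++ [[("end", n)]]
        | _ :: bs => acc ++ pvRanges last_idx bs n := by
  induction rest generalizing i acc n with
  | nil =>
    subst hn
    simp [dialogGoA, pvBnds, pvItemsNil]
  | cons t rs ih =>
    have hn' : n = (i + 1) + (rs.length : Int) := by
      rw [hn]; push_cast [List.length_cons]; ring
    by_cases h : pvEpisodeDone t = true
    · rw [show dialogGoA (t :: rs) i last_idx [] acc
          = dialogGoA rs (i + 1) last_idx [("start", last_idx)] acc by
        simp [dialogGoA, h]]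
      rw [dialogGoA_start rs (i + 1) last_idx last_idx acc n hn']
      simp [pvBnds, h]
    · rw [show dialogGoA (t :: rs) i last_idx [] acc
          = dialogGoA rs (i + 1) last_idx [] acc by simp [dialogGoA, h]]
      rw [ih (i + 1) acc n hn']
      simp [pvBnds, h]

theorem pvBnds_enumerate (rest : List (String × String × (List (String × Bool)))) (i : Int) :
    ((PySem.List.enumerate rest i).filter (fun p => pvEpisodeDone p.2)).map (fun p => p.1)
      = pvBnds rest i := by
  induction rest generalizing i with
  | nil => simp [PySem.List.enumerate_nil, pvBnds]
  | cons t rs ih =>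
    by_cases h : pvEpisodeDone t = true
    · simp [PySem.List.enumerate_cons, h, pvBnds, ih]
    · simp [PySem.List.enumerate_cons, h, pvBnds, ih]

theorem pvRanges_zip (s : Int) (bs : List Int) (n : Int) :
    ((s :: bs).zip (bs ++ [n])).map (fun p => [("start", p.1), ("end", p.2)])
      = pvRanges s bs n := by
  induction bs generalizing s with
  | nil => simp [pvRanges]
  | cons b bs' ih =>
    simp only [List.cons_append, List.zip_cons_cons, List.map_cons, pvRanges]
    rw [ih]

-- ===== VERDICT (by name: the statement is the Claim_ definition above) =====
theorem dialog_indices_py_spec : Claim_equal_dialog_indices_py := by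
  intro data _
  unfold Spec_dialog_indices_py dialog_indices_py dialog_indices_py_alt
  simp only
  rw [dialogGoA_empty data 0 0 [] (data.length : Int) (by simp), pvBnds_enumerate]
  cases h : pvBnds data 0 with
  | nil => simp
  | cons b bs =>
    simp only [List.isEmpty_cons, Bool.false_eq_true, ite_false, List.tail_cons,
      List.nil_append]
    rw [pvRanges_zip]
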